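-- pv_equiv track=rewrite | github.com/fhswf/wahl-o-chat | streamlit.py | output_per_line
-- ===== SOURCE A (Python) =====
-- def output_per_line(text: str, words_per_line: int=10) -> str:
--     text_parts = text.split('\n')
--     pretty_text = ''
--
--     for text_part in text_parts:
--         words = text_part.split(' ')
--         for i, word in enumerate(words):
--             pretty_text += word + ' '
--             if (i + 1) % words_per_line == 0 and i != len(words) - 1:
--                 pretty_text += '\n'
--         pretty_text += '\n'
--
--     return pretty_text
-- ===== SOURCE B (Python) =====
-- def output_per_line(text: str, words_per_line: int = 10) -> str:
--     out = []
--     for part in text.split('\n'):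
--         words = part.split(' ')
--         chunks = []
--         while words:
--             chunks.append(' '.join(words[:words_per_line]) + ' ')
--             words = words[words_per_line:]
--         out.append('\n'.join(chunks) + '\n')
--     return ''.join(out)
-- ===== Notes on version B (the rewrite author's own statement) =====
-- stated objective: alternative
-- what changed: B groups each line's words into chunks by repeated list slicing (words[:n] / words[n:]) and joins the chunks, instead of A's per-word scan with an enumerate index and a modulo test; Pre_ excludes words_per_line <= 0, where A raises ZeroDivisionError (at 0) or, for negative counts outside the natural domain, returns an accidental value of Python's sign-of-divisor modulo while B's slicing loop does not terminate.
-- outside the precondition, e.g. on output_per_line('a b c', -2): A returns 'a b \nc \n', B does not finish within the time limit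
import Mathlib
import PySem

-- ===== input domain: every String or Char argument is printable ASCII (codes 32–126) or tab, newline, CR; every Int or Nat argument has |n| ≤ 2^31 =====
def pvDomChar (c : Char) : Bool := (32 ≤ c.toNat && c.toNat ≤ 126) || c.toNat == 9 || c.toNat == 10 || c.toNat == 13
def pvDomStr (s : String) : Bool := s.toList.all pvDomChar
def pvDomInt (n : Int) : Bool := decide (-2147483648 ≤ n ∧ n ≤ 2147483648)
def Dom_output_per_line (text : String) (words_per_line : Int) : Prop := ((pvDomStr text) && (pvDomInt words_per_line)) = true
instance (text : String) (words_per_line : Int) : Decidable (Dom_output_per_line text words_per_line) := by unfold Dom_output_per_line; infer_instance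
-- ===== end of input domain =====

-- B rewraps by grouping each line's words into chunks via repeated slicing and joining,
-- instead of A's per-word scan with an enumerate index and a modulo test (alternative, same cost).

-- ===== PORT A =====
def output_per_line (text : String) (words_per_line : Int) : String :=
  let text_parts := PySem.Chars.splitOn text.toList ['\n']
  String.mk <| text_parts.foldl (fun pretty text_part =>
    let words := PySem.Chars.splitOn text_part [' ']
    let pretty := (PySem.List.enumerate words 0).foldl (fun pretty iw =>
      let pretty := pretty ++ iw.2 ++ [' ']
      if PySem.Int.mod (iw.1 + 1) words_per_line == 0 && iw.1 != (words.length : Int) - 1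
      then pretty ++ ['\n'] else pretty) pretty
    pretty ++ ['\n']) []

-- ===== PORT B =====
-- the 'while words:' loop of Source B; fuel = words.length suffices on Pre_ (words_per_line ≥ 1)
def pvChunks (n : Int) : Nat → List (List Char) → List (List Char)
  | _, [] => []
  | 0, _ => []
  | fuel + 1, ws =>
      (PySem.Chars.join [' '] (PySem.List.slice ws none (some n)) ++ [' '])
        :: pvChunks n fuel (PySem.List.slice ws (some n) none)

def output_per_line_alt (text : String) (words_per_line : Int) : String :=
  let out := (PySem.Chars.splitOn text.toList ['\n']).map (fun part =>
    let words := PySem.Chars.splitOn part [' ']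
    PySem.Chars.join ['\n'] (pvChunks words_per_line words.length words) ++ ['\n'])
  String.mk (PySem.Chars.join [] out)

-- ===== PRECONDITION & SPEC =====
-- Pre_ excludes words_per_line ≤ 0: at 0 Python A raises ZeroDivisionError; negative counts are
-- outside the task's natural domain (A's value there is an accident of Python's modulo sign, and
-- B's slicing loop does not terminate there).
def Pre_output_per_line (text : String) (words_per_line : Int) : Prop := 1 ≤ words_per_line
instance (text : String) (words_per_line : Int) : Decidable (Pre_output_per_line text words_per_line) := by unfold Pre_output_per_line; infer_instance
def pvWitness_output_per_line : String × Int := ("hello world wrap me", 2)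

def Spec_output_per_line (text : String) (words_per_line : Int) (out : String) : Prop := out = output_per_line_alt text words_per_line
instance (text : String) (words_per_line : Int) (out : String) : Decidable (Spec_output_per_line text words_per_line out) := by unfold Spec_output_per_line; infer_instance

-- ===== CLAIM (what is proved, stated in full; the proofs are below) =====
def Claim_equal_output_per_line : Prop := ∀ (text : String) (words_per_line : Int), Dom_output_per_line text words_per_line → Pre_output_per_line text words_per_line → Spec_output_per_line text words_per_line (output_per_line text words_per_line)

-- ===== LEMMAS AND PROOFS =====

-- per-word contribution of A's inner loop (n = words_per_line, L = words.length)
def pvG (n L : Int) (iw : Int × List Char) : List Char :=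
  iw.2 ++ [' '] ++ (if PySem.Int.mod (iw.1 + 1) n == 0 && iw.1 != L - 1 then ['\n'] else [])

lemma pvFoldl_inner (n L : Int) :
    ∀ (l : List (Int × List Char)) (acc : List Char),
      l.foldl (fun pretty iw =>
        if PySem.Int.mod (iw.1 + 1) n == 0 && iw.1 != L - 1
        then (pretty ++ iw.2 ++ [' ']) ++ ['\n'] else pretty ++ iw.2 ++ [' ']) acc
      = acc ++ l.flatMap (pvG n L) := by
  intro l
  induction l with
  | nil => intro acc; simp
  | cons x xs ih =>
      intro acc
      simp only [List.foldl_cons, List.flatMap_cons, ih]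
      unfold pvG
      split <;> simp

lemma pvJoin_empty_sep : ∀ (l : List (List Char)), PySem.Chars.join [] l = l.flatten := by
  intro l
  induction l with
  | nil => simp [PySem.Chars.join_nil]
  | cons a r ih =>
      cases r with
      | nil => simp [PySem.Chars.join_singleton]
      | cons b t => simp [PySem.Chars.join_cons_cons] at ih ⊢; simp [ih]

lemma pvJoin_cons (sep a : List Char) (l : List (List Char)) (h : l ≠ []) :
    PySem.Chars.join sep (a :: l) = a ++ sep ++ PySem.Chars.join sep l := by
  cases l with
  | nil => exact absurd rfl h
  | cons b t => exact PySem.Chars.join_cons_cons sep a b t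

lemma pvFmod_eq_zero_iff (a n : Int) (_h : 0 < n) : (PySem.Int.mod a n = 0) ↔ n ∣ a := by
  unfold PySem.Int.mod
  exact Int.dvd_iff_fmod_eq_zero.symm

-- evaluating A's word scan over one chunk, when the condition is false everywhere but possibly at the last word
lemma pvChunk_eval (c : Int → Bool) :
    ∀ (t : List (List Char)) (s : Int), t ≠ [] →
      (∀ k : Nat, k + 1 < t.length → c (s + k) = false) →
      (PySem.List.enumerate t s).flatMap (fun iw => iw.2 ++ [' '] ++ (if c iw.1 then ['\n'] else []))
        = PySem.Chars.join [' '] t ++ [' '] ++ (if c (s + t.length - 1) then ['\n'] else []) := by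
  intro t
  induction t with
  | nil => intro s h; exact absurd rfl h
  | cons x xs ih =>
      intro s _ hc
      cases xs with
      | nil => simp [PySem.List.enumerate_cons, PySem.Chars.join_singleton]
      | cons y r =>
          have hcx : c s = false := by simpa using hc 0 (by simp)
          have ht := ih (s + 1) (by simp) (by
            intro k hk
            have h2 := hc (k + 1) (by simp at hk ⊢; omega)
            have h3 : s + ((k + 1 : Nat) : Int) = s + 1 + (k : Int) := by push_cast; ring
            rwa [h3] at h2)
          rw [show s + 1 + (((y :: r).length : Int)) - 1 = s + (((x :: y :: r).length : Int)) - 1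
              from by push_cast [List.length_cons]; ring] at ht
          rw [PySem.List.enumerate_cons, List.flatMap_cons, ht, hcx,
            PySem.Chars.join_cons_cons]
          simp

-- unfolding one step of Source B's while loop
lemma pvChunks_cons (n : Int) (hn : 0 ≤ n) (fuel : Nat) (w : List Char) (t : List (List Char)) :
    pvChunks n (fuel + 1) (w :: t) =
      (PySem.Chars.join [' '] (List.take n.toNat (w :: t)) ++ [' '])
        :: pvChunks n fuel (List.drop n.toNat (w :: t)) := by
  unfold pvChunks
  rw [PySem.List.slice_to _ hn, PySem.List.slice_from _ hn]
  cases fuel <;> cases h : List.drop n.toNat (w :: t) <;> rfl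

-- the main per-line lemma: A's modulo scan over the remaining words equals B's chunk joining
lemma pvMain (n : Int) (hn : 1 ≤ n) :
    ∀ (fuel : Nat) (ws : List (List Char)) (s : Int), 0 ≤ s → n ∣ s → ws.length ≤ fuel →
      (PySem.List.enumerate ws s).flatMap (pvG n (s + ws.length)) =
        PySem.Chars.join ['\n'] (pvChunks n fuel ws) := by
  intro fuel
  induction fuel with
  | zero =>
      intro ws s _ _ hf
      cases ws with
      | nil => simp [PySem.List.enumerate_nil, pvChunks, PySem.Chars.join_nil]
      | cons w t => simp at hf
  | succ fuel ih =>
      intro ws0 s hs hdvd hf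
      cases ws0 with
      | nil => simp [PySem.List.enumerate_nil, pvChunks, PySem.Chars.join_nil]
      | cons w t =>
          set ws : List (List Char) := w :: t with hws
          have hlenws : ws.length = t.length + 1 := by rw [hws]; rfl
          have hwsne : ws ≠ [] := by rw [hws]; simp
          have hnn : (n.toNat : Int) = n := Int.toNat_of_nonneg (by omega)
          have hchunks : pvChunks n (fuel + 1) ws =
              (PySem.Chars.join [' '] (ws.take n.toNat) ++ [' ']) :: pvChunks n fuel (ws.drop n.toNat) := by
            rw [hws]; exact pvChunks_cons n (by omega) fuel w t
          set L : Int := s + ws.length with hLdef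
          have hGfun : pvG n L = (fun iw : Int × List Char =>
              iw.2 ++ [' '] ++ (if (PySem.Int.mod (iw.1 + 1) n == 0 && iw.1 != L - 1) then ['\n'] else [])) := rfl
          have hnotdvd : ∀ k : Nat, (k : Int) + 1 < n →
              ((PySem.Int.mod ((s + (k : Int)) + 1) n == 0) && ((s + (k : Int)) != L - 1)) = false := by
            intro k hk
            have : ¬ PySem.Int.mod (s + (k : Int) + 1) n = 0 := by
              rw [pvFmod_eq_zero_iff _ _ (by omega)]
              intro hdv
              have h1 : n ∣ ((k : Int) + 1) := by
                have h2 : s + ((k : Int) + 1) = s + (k : Int) + 1 := by ring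
                exact (Int.dvd_add_right hdvd).mp (by rwa [h2])
              have := Int.le_of_dvd (by omega) h1
              omega
            simp [this]
          rw [hGfun]
          by_cases hcase : ws.length ≤ n.toNat
          · -- final (single) chunk: ws fits entirely
            have htake : ws.take n.toNat = ws := List.take_of_length_le hcase
            have hdrop : ws.drop n.toNat = [] := List.drop_eq_nil_of_le hcase
            rw [hchunks, htake, hdrop]
            have hrest : pvChunks n fuel ([] : List (List Char)) = [] := by
              cases fuel <;> rfl
            rw [hrest, PySem.Chars.join_singleton]
            have heval := pvChunk_eval
              (fun i => PySem.Int.mod (i + 1) n == 0 && (i != L - 1)) ws s hwsne (by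
                intro k hk
                have hkn : (k : Int) + 1 < n := by
                  have h5 : (k : Int) + 1 < (ws.length : Int) := by exact_mod_cast hk
                  omega
                exact hnotdvd k hkn)
            have hlast : ((s + (ws.length : Int) - 1) != L - 1) = false := by
              simp [hLdef]
            simp only [hlast, Bool.and_false] at heval
            simpa using heval
          · -- a full chunk of n words, then recurse on the rest
            push_neg at hcase
            have hlen1 : (ws.take n.toNat).length = n.toNat := by
              rw [List.length_take]; omega
            have hlen2 : (ws.drop n.toNat).length = ws.length - n.toNat := by simp
            have ht1ne : ws.take n.toNat ≠ [] := by
              intro h; rw [h] at hlen1; simp at hlen1; omega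
            have ht2ne : ws.drop n.toNat ≠ [] := by
              intro h
              have := congrArg List.length h
              rw [hlen2] at this
              simp at this
              omega
            conv_lhs => rw [show ws = ws.take n.toNat ++ ws.drop n.toNat from (List.take_append_drop _ _).symm]
            rw [PySem.List.enumerate_append, List.flatMap_append]
            have hfirst := pvChunk_eval
              (fun i => PySem.Int.mod (i + 1) n == 0 && (i != L - 1)) (ws.take n.toNat) s ht1ne (by
                intro k hk
                rw [hlen1] at hk
                exact hnotdvd k (by omega))
            have hfirstc : ((PySem.Int.mod ((s + (((ws.take n.toNat).length) : Int) - 1) + 1) n == 0)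
                && ((s + (((ws.take n.toNat).length) : Int) - 1) != L - 1)) = true := by
              rw [hlen1, hnn]
              have h1 : PySem.Int.mod (s + n) n = 0 := by
                rw [pvFmod_eq_zero_iff _ _ (by omega)]
                exact Int.dvd_add hdvd ⟨1, by ring⟩
              have h2 : s + n - 1 ≠ L - 1 := by
                rw [hLdef]
                intro h
                omega
              simp [h1, h2]
            simp only [hfirstc] at hfirst
            simp only [if_pos] at hfirst
            have hIH : (PySem.List.enumerate (ws.drop n.toNat) (s + (((ws.take n.toNat).length) : Int))).flatMap (pvG n L) =
                PySem.Chars.join ['\n'] (pvChunks n fuel (ws.drop n.toNat)) := by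
              have hLeq : L = (s + (((ws.take n.toNat).length) : Int)) + (((ws.drop n.toNat).length) : Int) := by
                rw [hLdef, hlen1, hlen2]
                push_cast [Nat.cast_sub (le_of_lt hcase)]
                ring
              rw [hLeq]
              exact ih (ws.drop n.toNat) (s + (((ws.take n.toNat).length) : Int))
                (by rw [hlen1]; omega)
                (by rw [hlen1, hnn]; exact Int.dvd_add hdvd ⟨1, by ring⟩)
                (by rw [hlen2]; omega)
            have hchne : pvChunks n fuel (ws.drop n.toNat) ≠ [] := by
              cases hfu : fuel with
              | zero => exfalso; omega
              | succ f =>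
                  cases ht2 : ws.drop n.toNat with
                  | nil => exact absurd ht2 ht2ne
                  | cons a b => rw [pvChunks_cons n (by omega)]; simp
            rw [hfirst]
            rw [hGfun] at hIH
            rw [hIH, hchunks, pvJoin_cons _ _ _ hchne]

-- one whole line of text
lemma pvPart (n : Int) (hn : 1 ≤ n) (ws : List (List Char)) :
    (PySem.List.enumerate ws 0).flatMap (pvG n ws.length) =
      PySem.Chars.join ['\n'] (pvChunks n ws.length ws) := by
  have := pvMain n hn ws.length ws 0 le_rfl ⟨0, by ring⟩ le_rfl
  simpa using this

-- A's outer loop over the lines, with its running accumulator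
lemma pvOuter (n : Int) (hn : 1 ≤ n) :
    ∀ (parts : List (List Char)) (acc : List Char),
      parts.foldl (fun pretty text_part =>
        (List.foldl (fun pretty iw =>
          if PySem.Int.mod (iw.1 + 1) n == 0 && iw.1 != ((PySem.Chars.splitOn text_part [' ']).length : Int) - 1
          then (pretty ++ iw.2 ++ [' ']) ++ ['\n'] else pretty ++ iw.2 ++ [' '])
          pretty (PySem.List.enumerate (PySem.Chars.splitOn text_part [' ']) 0)) ++ ['\n']) acc
      = acc ++ (parts.map (fun part =>
          PySem.Chars.join ['\n']
            (pvChunks n (PySem.Chars.splitOn part [' ']).length (PySem.Chars.splitOn part [' '])) ++ ['\n'])).flatten := by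
  intro parts
  induction parts with
  | nil => intro acc; simp
  | cons p rest ih =>
      intro acc
      simp only [List.foldl_cons, List.map_cons, List.flatten_cons]
      rw [ih]
      rw [pvFoldl_inner n ((PySem.Chars.splitOn p [' ']).length : Int)]
      rw [pvPart n hn]
      simp

-- ===== VERDICT (by name: the statement is the Claim_ definition above) =====
theorem output_per_line_spec : Claim_equal_output_per_line := by
  intro text n _ hpre
  unfold Spec_output_per_line output_per_line output_per_line_alt
  simp only [pvJoin_empty_sep]
  rw [pvOuter n hpre]
  simp
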